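-- pv_equiv track=rewrite | github.com/daydream2002/rlcode | mah_tool/so_lib/srmj_v5/shangraoMJ_v5.py | get_xts_QingYiSe
-- ===== SOURCE A (Python) =====
-- def get_xts_QingYiSe(handCards0, fulu0):
--     # 将所有的副露融合成手牌的形式
--     all_fulu0_cards = []
--     for fulu in fulu0:
--         all_fulu0_cards.extend(fulu)
--     w, ti, to, z = 0, 0, 0, 0
--     for card in handCards0 + all_fulu0_cards:
--         if card & 0xf0 == 0x00:
--             w += 1
--         if card & 0xf0 == 0x10:
--             ti += 1
--         if card & 0xf0 == 0x20:
--             to += 1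
--         if card & 0xf0 == 0x30:
--             z += 1
--     l = []
--     l.append(w)
--     l.append(ti)
--     l.append(to)
--     l.append(z)
--     return len(handCards0) + len(all_fulu0_cards) - max(l)
-- ===== SOURCE B (Python) =====
-- def get_xts_QingYiSe(handCards0, fulu0):
--     # Dual formulation: instead of counting each suit and returning
--     # total - max(counts), take the MINIMUM over the four suits of the
--     # number of cards that would have to be discarded (cards NOT of that
--     # suit).  min_g |{c : c & 0xf0 != g}| == total - max_g |{c : c & 0xf0 == g}|.
--     cards = list(handCards0)
--     for fulu in fulu0:
--         cards.extend(fulu)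
--     return min(sum(1 for c in cards if c & 0xf0 != g)
--                for g in (0x00, 0x10, 0x20, 0x30))
-- ===== Notes on version B (the rewrite author's own statement) =====
-- stated objective: alternative
-- what changed: B computes the complement: for each of the four suits it counts the cards NOT of that suit (a generator sum per suit) and returns the minimum of those discard counts, instead of A's single pass maintaining four match counters and returning total length minus their maximum.
import Mathlib
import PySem

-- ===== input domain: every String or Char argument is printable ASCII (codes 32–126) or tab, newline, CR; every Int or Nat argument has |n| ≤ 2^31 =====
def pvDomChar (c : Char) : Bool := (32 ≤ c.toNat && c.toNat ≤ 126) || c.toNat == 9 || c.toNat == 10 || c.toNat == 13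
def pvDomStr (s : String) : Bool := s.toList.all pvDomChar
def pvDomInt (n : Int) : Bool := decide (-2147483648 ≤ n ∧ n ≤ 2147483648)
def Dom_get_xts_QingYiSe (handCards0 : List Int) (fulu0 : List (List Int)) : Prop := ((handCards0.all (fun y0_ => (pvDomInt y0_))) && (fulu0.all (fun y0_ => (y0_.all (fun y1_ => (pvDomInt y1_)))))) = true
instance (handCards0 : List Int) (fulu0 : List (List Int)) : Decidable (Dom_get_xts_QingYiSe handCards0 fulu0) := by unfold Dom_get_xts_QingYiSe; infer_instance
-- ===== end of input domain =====

-- B returns the minimum, over the four suits, of the number of cards NOT of that suit (discard counts), instead of A's four match counters and total-minus-max (alternative formulation, same cost).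

-- ===== PORT A =====
def get_xts_QingYiSe (handCards0 : List Int) (fulu0 : List (List Int)) : Int :=
  let all_fulu0_cards := fulu0.foldl (fun acc fulu => acc ++ fulu) []
  let st := (handCards0 ++ all_fulu0_cards).foldl
    (fun (s : Int × Int × Int × Int) card =>
      let s := if PySem.Int.band card 0xf0 == 0x00 then (s.1 + 1, s.2.1, s.2.2.1, s.2.2.2) else s
      let s := if PySem.Int.band card 0xf0 == 0x10 then (s.1, s.2.1 + 1, s.2.2.1, s.2.2.2) else s
      let s := if PySem.Int.band card 0xf0 == 0x20 then (s.1, s.2.1, s.2.2.1 + 1, s.2.2.2) else s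
      let s := if PySem.Int.band card 0xf0 == 0x30 then (s.1, s.2.1, s.2.2.1, s.2.2.2 + 1) else s
      s)
    (0, 0, 0, 0)
  let l := [st.1, st.2.1, st.2.2.1, st.2.2.2]
  (handCards0.length : Int) + (all_fulu0_cards.length : Int) - (PySem.List.max? l (fun x => x)).getD 0

-- ===== PORT B =====
-- sum(1 for c in cards if c & 0xf0 != g) is the running-sum fold over cards
def pvDiscards (cards : List Int) (g : Int) : Int :=
  cards.foldl (fun s c => if PySem.Int.band c 0xf0 != g then s + 1 else s) 0

def get_xts_QingYiSe_alt (handCards0 : List Int) (fulu0 : List (List Int)) : Int :=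
  let cards := fulu0.foldl (fun acc fulu => acc ++ fulu) handCards0
  (PySem.List.min? ([0x00, 0x10, 0x20, 0x30].map (fun g => pvDiscards cards g))
    (fun x => x)).getD 0

-- ===== PRECONDITION & SPEC =====
def Spec_get_xts_QingYiSe (handCards0 : List Int) (fulu0 : List (List Int)) (out : Int) : Prop := out = get_xts_QingYiSe_alt handCards0 fulu0
instance (handCards0 : List Int) (fulu0 : List (List Int)) (out : Int) : Decidable (Spec_get_xts_QingYiSe handCards0 fulu0 out) := by unfold Spec_get_xts_QingYiSe; infer_instance

-- ===== CLAIM =====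
def Claim_equal_get_xts_QingYiSe : Prop := ∀ (handCards0 : List Int) (fulu0 : List (List Int)), Dom_get_xts_QingYiSe handCards0 fulu0 → Spec_get_xts_QingYiSe handCards0 fulu0 (get_xts_QingYiSe handCards0 fulu0)

-- ===== LEMMAS AND PROOFS =====

-- folding (· ++ ·) over the meld lists is appending the flattened melds
theorem pv_foldl_append (l : List (List Int)) (init : List Int) :
    l.foldl (fun acc f => acc ++ f) init = init ++ l.flatten := by
  induction l generalizing init with
  | nil => simp
  | cons h t ih => simp [ih]

-- A's loop computes the four suit counts
theorem pv_loopA (cs : List Int) (w ti tb z : Int) :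
    cs.foldl
      (fun (s : Int × Int × Int × Int) card =>
        let s := if PySem.Int.band card 0xf0 == 0x00 then (s.1 + 1, s.2.1, s.2.2.1, s.2.2.2) else s
        let s := if PySem.Int.band card 0xf0 == 0x10 then (s.1, s.2.1 + 1, s.2.2.1, s.2.2.2) else s
        let s := if PySem.Int.band card 0xf0 == 0x20 then (s.1, s.2.1, s.2.2.1 + 1, s.2.2.2) else s
        let s := if PySem.Int.band card 0xf0 == 0x30 then (s.1, s.2.1, s.2.2.1, s.2.2.2 + 1) else s
        s)
      (w, ti, tb, z)
    = (w + cs.countP (fun c => PySem.Int.band c 0xf0 == 0x00),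
       ti + cs.countP (fun c => PySem.Int.band c 0xf0 == 0x10),
       tb + cs.countP (fun c => PySem.Int.band c 0xf0 == 0x20),
       z + cs.countP (fun c => PySem.Int.band c 0xf0 == 0x30)) := by
  induction cs generalizing w ti tb z with
  | nil => simp
  | cons c t ih =>
    simp only [List.foldl_cons, List.countP_cons]
    split_ifs <;> simp only [ih, Prod.mk.injEq] <;>
      refine ⟨by push_cast; ring, by push_cast; ring, by push_cast; ring, by push_cast; ring⟩

-- running-sum fold with a general accumulator
theorem pv_shift (t : List Int) (g : Int) (s : Int) :
    t.foldl (fun s c => if PySem.Int.band c 0xf0 != g then s + 1 else s) s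
      = s + t.foldl (fun s c => if PySem.Int.band c 0xf0 != g then s + 1 else s) 0 := by
  induction t generalizing s with
  | nil => simp
  | cons a u ihu =>
    simp only [List.foldl_cons]
    rw [ihu, ihu (if PySem.Int.band a 0xf0 != g then (0:Int) + 1 else 0)]
    split_ifs <;> ring

-- B's per-suit sum counts the cards NOT of that suit: length minus the match count
theorem pv_discards (cs : List Int) (g : Int) :
    pvDiscards cs g = (cs.length : Int) - (cs.countP (fun c => PySem.Int.band c 0xf0 == g) : Int) := by
  unfold pvDiscards
  induction cs with
  | nil => simp
  | cons c t ih =>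
    have hcnt : t.countP (fun c => PySem.Int.band c 0xf0 == g) ≤ t.length := List.countP_le_length
    simp only [List.foldl_cons]
    rw [pv_shift, ih]
    simp only [List.countP_cons, List.length_cons]
    split_ifs <;> simp_all <;> omega

-- ===== VERDICT =====
theorem get_xts_QingYiSe_spec : Claim_equal_get_xts_QingYiSe := by
  intro handCards0 fulu0 _
  unfold Spec_get_xts_QingYiSe get_xts_QingYiSe get_xts_QingYiSe_alt
  simp only [pv_foldl_append, pv_loopA, List.map, pv_discards, List.nil_append, zero_add,
    PySem.List.max?_id_cons, PySem.List.min?_id_cons, List.foldl_cons, List.foldl_nil,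
    Option.getD_some, List.length_append]
  set cs := handCards0 ++ fulu0.flatten with hcs
  have h0 := List.countP_le_length (p := fun c => PySem.Int.band c 0xf0 == 0x00) (l := cs)
  have h1 := List.countP_le_length (p := fun c => PySem.Int.band c 0xf0 == 0x10) (l := cs)
  have h2 := List.countP_le_length (p := fun c => PySem.Int.band c 0xf0 == 0x20) (l := cs)
  have h3 := List.countP_le_length (p := fun c => PySem.Int.band c 0xf0 == 0x30) (l := cs)
  simp only [max_def, min_def]
  split_ifs <;> push_cast <;> omega
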